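-- pv_equiv track=rewrite | github.com/VaibhavMishra173/GFG-DSA | 5.Arrays/program.py | indexOfSecondLargestEleInArr
-- ===== SOURCE A (Python) =====
-- def indexOfSecondLargestEleInArr(l):
--     if len(l) < 2:
--         return -1  # Return -1 if there are fewer than 2 elements
--
--     m = float('-inf')  # Largest element
--     snd = float('-inf')  # Second largest element
--     ind = -1  # Index of largest element
--     sndIdx = -1  # Index of second largest element
--
--     for i in range(len(l)):
--         if l[i] > m:
--             # Update second largest before largest
--             snd = m
--             sndIdx = ind
--             # Update largest
--             m = l[i]
--             ind = i
--         elif l[i] > snd and l[i] != m: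
--             # Update second largest only if current element is not equal to largest
--             snd = l[i]
--             sndIdx = i
--
--     return sndIdx
-- ===== SOURCE B (Python) =====
-- def indexOfSecondLargestEleInArr(l):
--     if len(l) < 2:
--         return -1
--     # Pass 1: the maximum (sentinel-loop, strict >)
--     mx = float('-inf')
--     for v in l:
--         if v > mx:
--             mx = v
--     # Pass 2: first index of the largest value different from mx
--     second = float('-inf')
--     second_idx = -1
--     for i, v in enumerate(l):
--         if v != mx and v > second:
--             second = v
--             second_idx = i
--     return second_idx
-- ===== Notes on version B (the rewrite author's own statement) =====
-- stated objective: simpler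
-- what changed: Replaces A's single pass with four coupled accumulators (running max, running second, both indices, updated in a cascading branch) by two independent simple passes: first compute the maximum, then a plain argmax scan over elements different from it.
import Mathlib
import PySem

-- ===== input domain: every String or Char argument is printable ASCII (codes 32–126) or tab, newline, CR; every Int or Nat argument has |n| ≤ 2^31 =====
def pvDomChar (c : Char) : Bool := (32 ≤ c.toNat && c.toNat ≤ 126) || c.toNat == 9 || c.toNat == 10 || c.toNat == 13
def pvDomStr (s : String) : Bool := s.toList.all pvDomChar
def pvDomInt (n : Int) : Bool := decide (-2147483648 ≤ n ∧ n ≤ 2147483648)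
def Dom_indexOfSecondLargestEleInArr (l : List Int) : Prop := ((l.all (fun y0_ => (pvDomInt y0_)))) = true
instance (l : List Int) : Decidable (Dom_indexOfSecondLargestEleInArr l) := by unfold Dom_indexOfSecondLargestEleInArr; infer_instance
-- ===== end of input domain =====

-- B replaces A's single pass with four coupled accumulators by two independent simple
-- passes (max, then argmax over elements ≠ max); same O(n) cost, simpler decomposition.

-- The float('-inf') sentinel is modelled as `none`: `gtO v m` is Python's `v > m` and
-- `neO v m` is Python's `v != m` where m is -inf (none) or an int (some x); exact here
-- because every list element is an int and -inf is strictly below and unequal to all ints.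
def gtO (v : Int) (m : Option Int) : Bool :=
  match m with
  | none => true
  | some x => decide (x < v)

def neO (v : Int) (m : Option Int) : Bool :=
  match m with
  | none => true
  | some x => decide (v ≠ x)

-- ===== PORT A =====
-- the `for i in range(len(l))` loop of A, state (m, snd, ind, sndIdx)
def aLoop : List Int → Int → Option Int → Option Int → Int → Int → Int
  | [], _, _, _, _, sndIdx => sndIdx
  | v :: rest, i, m, snd, ind, sndIdx =>
    if gtO v m then aLoop rest (i+1) (some v) m i ind
    else if gtO v snd && neO v m then aLoop rest (i+1) m (some v) ind i
    else aLoop rest (i+1) m snd ind sndIdx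

def indexOfSecondLargestEleInArr (l : List Int) : Int :=
  if l.length < 2 then -1 else aLoop l 0 none none (-1) (-1)

-- ===== PORT B =====
-- pass 1 of B: the sentinel-loop maximum
def maxLoop : List Int → Option Int → Option Int
  | [], m => m
  | v :: rest, m => maxLoop rest (if gtO v m then some v else m)

-- pass 2 of B: argmax scan over elements different from mx, state (second, second_idx)
def sndLoop : List Int → Int → Option Int → Option Int → Int → Int
  | [], _, _, _, idx => idx
  | v :: rest, i, mx, second, idx =>
    if neO v mx && gtO v second then sndLoop rest (i+1) mx (some v) i
    else sndLoop rest (i+1) mx second idx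

def indexOfSecondLargestEleInArr_alt (l : List Int) : Int :=
  if l.length < 2 then -1 else sndLoop l 0 (maxLoop l none) none (-1)

-- ===== PRECONDITION & SPEC =====
def Spec_indexOfSecondLargestEleInArr (l : List Int) (out : Int) : Prop := out = indexOfSecondLargestEleInArr_alt l
instance (l : List Int) (out : Int) : Decidable (Spec_indexOfSecondLargestEleInArr l out) := by unfold Spec_indexOfSecondLargestEleInArr; infer_instance

-- ===== CLAIM (what is proved, stated in full; the proofs are below) =====
def Claim_equal_indexOfSecondLargestEleInArr : Prop := ∀ (l : List Int), Dom_indexOfSecondLargestEleInArr l → Spec_indexOfSecondLargestEleInArr l (indexOfSecondLargestEleInArr l)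

-- ===== LEMMAS AND PROOFS =====

-- the sentinel-loop maximum of x and l is an element ≥ everything seen
theorem maxGo_spec : ∀ (l : List Int) (x : Int), ∃ M, maxLoop l (some x) = some M ∧
    x ≤ M ∧ (M = x ∨ M ∈ l) ∧ ∀ v ∈ l, v ≤ M := by
  intro l
  induction l with
  | nil => intro x; exact ⟨x, rfl, le_refl x, Or.inl rfl, by simp⟩
  | cons v rest ih =>
    intro x
    by_cases h : x < v
    · obtain ⟨M, hM, hle, hmem, hall⟩ := ih v
      refine ⟨M, ?_, le_of_lt (lt_of_lt_of_le h hle), ?_, ?_⟩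
      · simpa [maxLoop, gtO, h] using hM
      · rcases hmem with h1 | h1
        · exact Or.inr (by simp [h1])
        · exact Or.inr (by simp [h1])
      · intro w hw
        simp only [List.mem_cons] at hw
        rcases hw with rfl | hw
        · exact hle
        · exact hall _ hw
    · obtain ⟨M, hM, hle, hmem, hall⟩ := ih x
      refine ⟨M, ?_, hle, ?_, ?_⟩
      · simpa [maxLoop, gtO, h] using hM
      · rcases hmem with h1 | h1
        · exact Or.inl h1
        · exact Or.inr (by simp [h1])
      · intro w hw
        simp only [List.mem_cons] at hw
        rcases hw with rfl | hw
        · exact le_trans (le_of_not_gt h) hle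
        · exact hall _ hw

-- core invariant: A's loop equals B's second pass given the global maximum M.
-- Case 1: A's running max has reached M, and A's (snd, sndIdx) = B's (second, idx).
-- Case 2: A's running max is still below M (M occurs later), B's (second, idx)
-- tracks A's running max (m, ind); A's (snd, sndIdx) are dead (overwritten when M is hit).
theorem loop_eq : ∀ (rest : List Int) (i : Int) (m snd : Option Int) (ind sndIdx : Int)
    (second : Option Int) (idx : Int) (M : Int),
    (∀ v ∈ rest, v ≤ M) →
    ((m = some M ∧ snd = second ∧ sndIdx = idx) ∨
     ((∀ x, m = some x → x < M) ∧ m = second ∧ ind = idx ∧ M ∈ rest)) →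
    aLoop rest i m snd ind sndIdx = sndLoop rest i (some M) second idx := by
  intro rest
  induction rest with
  | nil =>
    intro i m snd ind sndIdx second idx M _ hinv
    rcases hinv with ⟨_, _, h3⟩ | ⟨_, _, _, hmem⟩
    · simp [aLoop, sndLoop, h3]
    · simp at hmem
  | cons v rest ih =>
    intro i m snd ind sndIdx second idx M hle hinv
    have hvM : v ≤ M := hle v (by simp)
    have hle' : ∀ w ∈ rest, w ≤ M := fun w hw => hle w (by simp [hw])
    rcases hinv with ⟨hm, hsnd, hidx⟩ | ⟨hlt, hm, hind, hmem⟩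
    · -- case 1: running max already M
      have hg : gtO v m = false := by
        simp [hm, gtO]; omega
      simp only [aLoop, sndLoop, hg, Bool.false_eq_true, if_false]
      have hne : neO v m = neO v (some M) := by rw [hm]
      rw [hsnd, hne]
      by_cases hb : (gtO v second && neO v (some M)) = true
      · have hb' : (neO v (some M) && gtO v second) = true := by
          rw [Bool.and_comm]; exact hb
        rw [if_pos hb, if_pos hb']
        exact ih _ _ _ _ _ _ _ _ hle' (Or.inl ⟨hm, rfl, rfl⟩)
      · have hb' : ¬ (neO v (some M) && gtO v second) = true := by
          rw [Bool.and_comm]; exact hb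
        rw [if_neg hb, if_neg hb']
        exact ih _ _ _ _ _ _ _ _ hle' (Or.inl ⟨hm, hsnd ▸ rfl, hidx⟩)
    · -- case 2: running max still below M
      by_cases hvEq : v = M
      · -- transition step: A adopts M, B skips (v == mx)
        have hg : gtO v m = true := by
          cases m with
          | none => rfl
          | some x => simp [gtO]; exact hvEq ▸ hlt x rfl
        have hne : neO v (some M) = false := by simp [neO, hvEq]
        simp only [aLoop, sndLoop, hg, if_true, hne, Bool.false_and,
          Bool.false_eq_true, if_false]
        exact ih _ _ _ _ _ _ _ _ hle' (Or.inl ⟨by rw [hvEq], hm, hind⟩)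
      · have hvlt : v < M := lt_of_le_of_ne hvM hvEq
        have hmem' : M ∈ rest := by
          simp only [List.mem_cons] at hmem
          rcases hmem with h | h
          · exact absurd h.symm hvEq
          · exact h
        have hne : neO v (some M) = true := by simp [neO, hvEq]
        by_cases hg : gtO v m = true
        · -- v is a new running max for A, and beats B's second (= m)
          have hb' : (neO v (some M) && gtO v second) = true := by
            rw [hne, ← hm, hg]; rfl
          simp only [aLoop, sndLoop, hg, if_true, hb']
          exact ih _ _ _ _ _ _ _ _ hle'
            (Or.inr ⟨fun x hx => by injection hx with h; omega, rfl, rfl, hmem'⟩)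
        · -- v ≤ running max: B skips; A may update only its dead (snd, sndIdx)
          have hb' : (neO v (some M) && gtO v second) = false := by
            rw [← hm]; simp [hg]
          simp only [aLoop, sndLoop, hg, Bool.false_eq_true, if_false, hb']
          by_cases h2 : (gtO v snd && neO v m) = true
          · rw [if_pos h2]
            exact ih _ _ _ _ _ _ _ _ hle' (Or.inr ⟨hlt, hm, hind, hmem'⟩)
          · rw [if_neg h2]
            exact ih _ _ _ _ _ _ _ _ hle' (Or.inr ⟨hlt, hm, hind, hmem'⟩)

-- ===== VERDICT (by name: the statement is the Claim_ definition above) =====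
theorem indexOfSecondLargestEleInArr_spec : Claim_equal_indexOfSecondLargestEleInArr := by
  intro l _
  unfold Spec_indexOfSecondLargestEleInArr indexOfSecondLargestEleInArr indexOfSecondLargestEleInArr_alt
  by_cases h : l.length < 2
  · simp [h]
  · rw [if_neg h, if_neg h]
    cases l with
    | nil => simp at h
    | cons v rest =>
      obtain ⟨M, hM, hle, hmem, hall⟩ := maxGo_spec rest v
      have hmax : maxLoop (v :: rest) none = some M := by
        simpa [maxLoop, gtO] using hM
      rw [hmax]
      apply loop_eq
      · intro w hw
        simp only [List.mem_cons] at hw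
        rcases hw with rfl | hw
        · exact hle
        · exact hall _ hw
      · refine Or.inr ⟨by simp, rfl, rfl, ?_⟩
        rcases hmem with h1 | h1
        · simp [h1]
        · simp [h1]
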